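-- pv_equiv track=rewrite | github.com/lukaszymanski/Group-11-Software-Now-A2 | q1.py | decrypt_char
-- ===== SOURCE A (Python) =====
-- def encrypt_char(char, shift1, shift2):
--     """
--     Encrypts one character
--     """
--     #lowercase rules
--     if char.islower():
--         offset = 97
--         char_position = ord(char) - offset
--
--         if char_position < 13: # first alphabet half (a-m)
--             new_position = (char_position + shift1 * shift2) % 26
--         else: #second alphabet half
--             new_position = (char_position - (shift1 + shift2)) % 26
--
--         return chr(new_position + offset)
--
--     # uppercase rules
--     elif char.isupper():
--         offset = 65
--         char_position = ord(char) - offset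
--
--         if char_position < 13: # first alphabet half (A-M)
--             new_position = (char_position - shift1) % 26
--         else: # sencond alphabet half (N-Z)
--             new_position = (char_position + shift2 ** 2) % 26
--
--         return chr(new_position + offset)
--
--     else: # other characters
--         return char
--
-- def decrypt_char(char, shift1, shift2):
--     """
--     Decrypts one character
--     """
--     # other characters
--     if not char.isalpha():
--         return char
--
--     # try lowercase decrypt
--     if char.islower():
--         for test_char in "abcdefghijklmnopqrstuvwxyz":
--             if encrypt_char(test_char, shift1, shift2) == char:
--                 return test_char
--
--     # try uppercase decrypt
--     if char.isupper():
--         for test_char in "ABCDEFGHIJKLMNOPQRSTUVWXYZ":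
--             if encrypt_char(test_char, shift1, shift2) == char:
--                 return test_char
--
--     return char
-- ===== SOURCE B (Python) =====
-- def decrypt_char(char, shift1, shift2):
--     """
--     Decrypts one character by inverting encrypt_char's modular formulas directly
--     (first-half preimage tried before second-half, matching the scan order).
--     """
--     if len(char) != 1 or not char.isalpha():
--         return char
--     if char.islower():
--         p = ord(char) - 97
--         q1 = (p - shift1 * shift2) % 26
--         if q1 < 13:
--             return chr(q1 + 97)
--         q2 = (p + shift1 + shift2) % 26
--         if q2 >= 13:
--             return chr(q2 + 97)
--         return char
--     p = ord(char) - 65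
--     q1 = (p + shift1) % 26
--     if q1 < 13:
--         return chr(q1 + 65)
--     q2 = (p - shift2 * shift2) % 26
--     if q2 >= 13:
--         return chr(q2 + 65)
--     return char
-- ===== Notes on version B (the rewrite author's own statement) =====
-- stated objective: faster
-- what changed: Replaces the 26-candidate brute-force re-encryption scan with a direct O(1) modular inversion of encrypt_char's piecewise formulas, trying the first-half preimage before the second-half to keep A's first-match tie-break and unchanged-char fallthrough.
import Mathlib
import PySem

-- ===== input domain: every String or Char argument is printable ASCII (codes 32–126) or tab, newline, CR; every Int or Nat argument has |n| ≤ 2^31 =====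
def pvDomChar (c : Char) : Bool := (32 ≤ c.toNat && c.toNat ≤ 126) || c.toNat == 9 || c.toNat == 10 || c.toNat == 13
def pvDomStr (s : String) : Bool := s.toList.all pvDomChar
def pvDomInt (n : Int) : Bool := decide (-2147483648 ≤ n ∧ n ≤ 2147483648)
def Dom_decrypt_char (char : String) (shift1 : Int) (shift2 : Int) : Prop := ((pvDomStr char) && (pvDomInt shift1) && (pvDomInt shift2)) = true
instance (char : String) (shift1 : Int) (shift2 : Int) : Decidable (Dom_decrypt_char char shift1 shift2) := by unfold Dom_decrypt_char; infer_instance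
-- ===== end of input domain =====

-- B replaces A's 26-candidate brute-force re-encryption scan with a direct modular
-- inversion of encrypt_char's piecewise formulas (objective: faster, constant-factor mechanism;
-- first-half preimage tried before second-half to keep A's first-match tie-break).

-- ===== PORT A =====
-- Python str.islower()/str.isupper(), exact on the ASCII domain (cased chars = letters)
def pvIslowerStr (cs : List Char) : Bool :=
  cs.any PySem.Chars.islower && cs.all (fun c => !PySem.Chars.isupper c)
def pvIsupperStr (cs : List Char) : Bool :=
  cs.any PySem.Chars.isupper && cs.all (fun c => !PySem.Chars.islower c)

def encrypt_char (c : Char) (shift1 : Int) (shift2 : Int) : Char :=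
  if PySem.Chars.islower c then
    let p : Int := (c.toNat : Int) - 97
    let np : Int := if p < 13 then PySem.Int.mod (p + shift1 * shift2) 26
                    else PySem.Int.mod (p - (shift1 + shift2)) 26
    Char.ofNat (np + 97).toNat
  else if PySem.Chars.isupper c then
    let p : Int := (c.toNat : Int) - 65
    let np : Int := if p < 13 then PySem.Int.mod (p - shift1) 26
                    else PySem.Int.mod (p + shift2 ^ 2) 26
    Char.ofNat (np + 65).toNat
  else c

def decrypt_char (char : String) (shift1 : Int) (shift2 : Int) : String :=
  if !PySem.Str.strIsalpha char then char
  else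
    let lowHit : Option Char :=
      if pvIslowerStr char.toList then
        "abcdefghijklmnopqrstuvwxyz".toList.find?
          (fun t => [encrypt_char t shift1 shift2] == char.toList)
      else none
    match lowHit with
    | some t => String.ofList [t]
    | none =>
      let upHit : Option Char :=
        if pvIsupperStr char.toList then
          "ABCDEFGHIJKLMNOPQRSTUVWXYZ".toList.find?
            (fun t => [encrypt_char t shift1 shift2] == char.toList)
        else none
      match upHit with
      | some t => String.ofList [t]
      | none => char

-- ===== PORT B =====
def decrypt_char_alt (char : String) (shift1 : Int) (shift2 : Int) : String :=
  match char.toList with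
  | [c] =>
    if PySem.Chars.isalpha c then
      if PySem.Chars.islower c then
        let p : Int := (c.toNat : Int) - 97
        let q1 : Int := PySem.Int.mod (p - shift1 * shift2) 26
        if q1 < 13 then String.ofList [Char.ofNat (q1 + 97).toNat]
        else
          let q2 : Int := PySem.Int.mod (p + shift1 + shift2) 26
          if 13 ≤ q2 then String.ofList [Char.ofNat (q2 + 97).toNat] else char
      else
        let p : Int := (c.toNat : Int) - 65
        let q1 : Int := PySem.Int.mod (p + shift1) 26
        if q1 < 13 then String.ofList [Char.ofNat (q1 + 65).toNat]
        else
          let q2 : Int := PySem.Int.mod (p - shift2 * shift2) 26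
          if 13 ≤ q2 then String.ofList [Char.ofNat (q2 + 65).toNat] else char
    else char
  | _ => char

-- ===== PRECONDITION & SPEC =====
def Spec_decrypt_char (char : String) (shift1 : Int) (shift2 : Int) (out : String) : Prop := out = decrypt_char_alt char shift1 shift2
instance (char : String) (shift1 : Int) (shift2 : Int) (out : String) : Decidable (Spec_decrypt_char char shift1 shift2 out) := by unfold Spec_decrypt_char; infer_instance

-- ===== CLAIM (what is proved, stated in full; the proofs are below) =====
def Claim_equal_decrypt_char : Prop := ∀ (char : String) (shift1 : Int) (shift2 : Int), Dom_decrypt_char char shift1 shift2 → Spec_decrypt_char char shift1 shift2 (decrypt_char char shift1 shift2)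

-- ===== LEMMAS AND PROOFS =====

lemma pvFindRangeNone (f : Nat → Bool) (n : Nat) (h : ∀ j, j < n → f j = false) :
    (List.range n).find? f = none := by
  induction n with
  | zero => simp
  | succ m ih =>
    rw [List.range_succ, List.find?_append, ih (fun j hj => h j (by omega))]
    simp [h m (by omega)]

lemma pvFindRangeSome (f : Nat → Bool) (n k : Nat) (hk : k < n) (hfk : f k = true)
    (hb : ∀ j, j < k → f j = false) : (List.range n).find? f = some k := by
  induction n with
  | zero => omega
  | succ m ih =>
    rw [List.range_succ, List.find?_append]
    by_cases hkm : k < m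
    · rw [ih hkm]; rfl
    · have : k = m := by omega
      subst this
      rw [pvFindRangeNone f k hb]
      simp [hfk]

-- first match of A's scan, characterised: first-half preimage first, then second-half
lemma pvFindCore (M T p : Int) (hp : 0 ≤ p) (hp' : p < 26) :
  (List.range 26).find? (fun i : Nat => decide ((if (i:Int) < 13 then (i:Int) + M else (i:Int) - T) % 26 = p))
  = (if (p - M) % 26 < 13 then some ((p - M) % 26).toNat
     else if 13 ≤ (p + T) % 26 then some ((p + T) % 26).toNat else none) := by
  have hq1b : 0 ≤ (p - M) % 26 ∧ (p - M) % 26 < 26 := by constructor <;> omega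
  have hq2b : 0 ≤ (p + T) % 26 ∧ (p + T) % 26 < 26 := by constructor <;> omega
  split_ifs with h1 h2
  · apply pvFindRangeSome _ _ _ (by omega)
    · simp only [decide_eq_true_eq]; split <;> omega
    · intro j hj
      simp only [decide_eq_false_iff_not]; split <;> omega
  · apply pvFindRangeSome _ _ _ (by omega)
    · simp only [decide_eq_true_eq]; split <;> omega
    · intro j hj
      simp only [decide_eq_false_iff_not]; split <;> omega
  · apply pvFindRangeNone
    intro j hj
    simp only [decide_eq_false_iff_not]; split <;> omega

lemma pvFindCongr {α : Type} (l : List α) (p q : α → Bool) (h : ∀ a ∈ l, p a = q a) :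
    l.find? p = l.find? q := by
  induction l with
  | nil => rfl
  | cons a as ih =>
    rw [List.find?_cons, List.find?_cons, h a (by simp)]
    cases q a
    · exact ih (fun x hx => h x (by simp [hx]))
    · rfl

lemma pvLowerList : "abcdefghijklmnopqrstuvwxyz".toList
    = (List.range 26).map (fun i => Char.ofNat (97 + i)) := by decide
lemma pvUpperList : "ABCDEFGHIJKLMNOPQRSTUVWXYZ".toList
    = (List.range 26).map (fun i => Char.ofNat (65 + i)) := by decide

lemma pvLowIslower : ∀ i : Fin 26, PySem.Chars.islower (Char.ofNat (97 + i.val)) = true := by decide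
lemma pvUpIsupper : ∀ i : Fin 26, PySem.Chars.isupper (Char.ofNat (65 + i.val)) = true := by decide
lemma pvUpNotLower : ∀ i : Fin 26, PySem.Chars.islower (Char.ofNat (65 + i.val)) = false := by decide
lemma pvLowToNat : ∀ i : Fin 26, (Char.ofNat (97 + i.val)).toNat = 97 + i.val := by decide
lemma pvUpToNat : ∀ i : Fin 26, (Char.ofNat (65 + i.val)).toNat = 65 + i.val := by decide

lemma pvLowBounds (c : Char) (h : PySem.Chars.islower c = true) : 97 ≤ c.toNat ∧ c.toNat ≤ 122 := by
  simp [PySem.Chars.islower, Char.le_def, UInt32.le_iff_toNat_le] at h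
  exact h

lemma pvUpBounds (c : Char) (h : PySem.Chars.isupper c = true) : 65 ≤ c.toNat ∧ c.toNat ≤ 90 := by
  simp [PySem.Chars.isupper, Char.le_def, UInt32.le_iff_toNat_le] at h
  exact h

lemma pvLowNotUpper (c : Char) (h : PySem.Chars.islower c = true) : PySem.Chars.isupper c = false := by
  have := pvLowBounds c h
  simp [PySem.Chars.isupper, Char.le_def, UInt32.le_iff_toNat_le]
  omega

lemma pvUpNotLowerC (c : Char) (h : PySem.Chars.isupper c = true) : PySem.Chars.islower c = false := by
  have := pvUpBounds c h
  simp [PySem.Chars.islower, Char.le_def, UInt32.le_iff_toNat_le]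
  omega

lemma pvSelf (c : Char) (off : Nat) (h : off ≤ c.toNat) : c = Char.ofNat (off + (c.toNat - off)) := by
  have : off + (c.toNat - off) = c.toNat := by omega
  rw [this, Char.ofNat_toNat]

-- char comparison reduced to arithmetic on codes (lowercase letters)
lemma pvCharEqLow (x : Int) (p : Nat) (hx0 : 0 ≤ x) (hx : x < 26) (hp : p < 26) :
    ([Char.ofNat (x + 97).toNat] == [Char.ofNat (97 + p)]) = decide (x = (p:Int)) := by
  have h1 : (x + 97).toNat = 97 + x.toNat := by omega
  rw [h1]
  have h2 : (Char.ofNat (97 + x.toNat)).toNat = 97 + x.toNat := pvLowToNat ⟨x.toNat, by omega⟩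
  have h3 : (Char.ofNat (97 + p)).toNat = 97 + p := pvLowToNat ⟨p, hp⟩
  rw [Bool.eq_iff_iff]
  simp only [beq_iff_eq, decide_eq_true_eq, List.cons.injEq, and_true]
  constructor
  · intro hEq
    have := congrArg Char.toNat hEq
    rw [h2, h3] at this
    omega
  · intro hEq
    have : x.toNat = p := by omega
    rw [this]

lemma pvCharEqUp (x : Int) (p : Nat) (hx0 : 0 ≤ x) (hx : x < 26) (hp : p < 26) :
    ([Char.ofNat (x + 65).toNat] == [Char.ofNat (65 + p)]) = decide (x = (p:Int)) := by
  have h1 : (x + 65).toNat = 65 + x.toNat := by omega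
  rw [h1]
  have h2 : (Char.ofNat (65 + x.toNat)).toNat = 65 + x.toNat := pvUpToNat ⟨x.toNat, by omega⟩
  have h3 : (Char.ofNat (65 + p)).toNat = 65 + p := pvUpToNat ⟨p, hp⟩
  rw [Bool.eq_iff_iff]
  simp only [beq_iff_eq, decide_eq_true_eq, List.cons.injEq, and_true]
  constructor
  · intro hEq
    have := congrArg Char.toNat hEq
    rw [h2, h3] at this
    omega
  · intro hEq
    have : x.toNat = p := by omega
    rw [this]

theorem pvLowCase (c : Char) (s1 s2 : Int) (h : PySem.Chars.islower c = true) :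
    decrypt_char (String.ofList [c]) s1 s2 = decrypt_char_alt (String.ofList [c]) s1 s2 := by
  obtain ⟨hb1, hb2⟩ := pvLowBounds c h
  have hup := pvLowNotUpper c h
  set p : Nat := c.toNat - 97 with hpdef
  have hp : p < 26 := by omega
  have hc : c = Char.ofNat (97 + p) := pvSelf c 97 hb1
  have halpha : PySem.Chars.isalpha c = true := by simp [PySem.Chars.isalpha, h]
  have hA : PySem.Str.strIsalpha (String.ofList [c]) = true := by
    simp [PySem.Str.strIsalpha, PySem.Chars.strIsalpha, halpha]
  have hl : pvIslowerStr [c] = true := by simp [pvIslowerStr, h, hup]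
  have hu : pvIsupperStr [c] = false := by simp [pvIsupperStr, hup]
  have hmodA : ∀ X : Int, PySem.Int.mod X 26 = X % 26 :=
    fun X => PySem.Int.mod_eq_emod_of_pos (by norm_num)
  have hfind : "abcdefghijklmnopqrstuvwxyz".toList.find?
        (fun t => [encrypt_char t s1 s2] == (String.ofList [c]).toList)
      = Option.map (fun i => Char.ofNat (97 + i))
          (if ((p:Int) - s1*s2) % 26 < 13 then some ((((p:Int) - s1*s2) % 26).toNat)
           else if 13 ≤ ((p:Int) + (s1+s2)) % 26 then some ((((p:Int) + (s1+s2)) % 26).toNat)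
           else none) := by
    rw [pvLowerList, List.find?_map]
    rw [pvFindCongr _ _ (fun i : Nat =>
        decide ((if (i:Int) < 13 then (i:Int) + (s1*s2) else (i:Int) - (s1+s2)) % 26 = (p:Int)))]
    · rw [pvFindCore (s1*s2) (s1+s2) (p:Int) (by positivity) (by exact_mod_cast hp)]
    · intro i hi
      have hi26 : i < 26 := List.mem_range.mp hi
      simp only [Function.comp, String.toList_ofList]
      rw [hc]
      simp only [encrypt_char, pvLowIslower ⟨i, hi26⟩, if_true]
      have hcast : ((Char.ofNat (97 + i)).toNat : Int) - 97 = (i : Int) := by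
        rw [pvLowToNat ⟨i, hi26⟩]; push_cast; ring
      rw [hcast]
      by_cases h13 : (i : Int) < 13
      · simp only [if_pos h13, hmodA]
        exact pvCharEqLow _ p (by omega) (by omega) hp
      · simp only [if_neg h13, hmodA]
        exact pvCharEqLow _ p (by omega) (by omega) hp
  simp only [decrypt_char, decrypt_char_alt, String.toList_ofList] at hfind ⊢
  rw [hA] at *
  simp only [hl, hu, Bool.not_true, if_true, if_false, Bool.false_eq_true] at *
  rw [hfind]
  simp only [halpha, h, if_true]
  have hpc : ((c.toNat : Nat) : Int) - 97 = (p : Int) := by omega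
  rw [hpc]
  simp only [hmodA]
  have hassoc : (p:Int) + s1 + s2 = (p:Int) + (s1 + s2) := by ring
  rw [hassoc]
  split_ifs with hq1 hq2
  · have he : (97 + (((p:Int) - s1 * s2) % 26).toNat) = ((((p:Int) - s1 * s2) % 26) + 97).toNat := by
      omega
    simp only [Option.map_some, he]
  · have he : (97 + (((p:Int) + (s1 + s2)) % 26).toNat) = ((((p:Int) + (s1 + s2)) % 26) + 97).toNat := by
      omega
    simp only [Option.map_some, he]
  · simp only [Option.map_none]

theorem pvUpCase (c : Char) (s1 s2 : Int) (h : PySem.Chars.isupper c = true) :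
    decrypt_char (String.ofList [c]) s1 s2 = decrypt_char_alt (String.ofList [c]) s1 s2 := by
  obtain ⟨hb1, hb2⟩ := pvUpBounds c h
  have hlo := pvUpNotLowerC c h
  set p : Nat := c.toNat - 65 with hpdef
  have hp : p < 26 := by omega
  have hc : c = Char.ofNat (65 + p) := pvSelf c 65 hb1
  have halpha : PySem.Chars.isalpha c = true := by simp [PySem.Chars.isalpha, h]
  have hA : PySem.Str.strIsalpha (String.ofList [c]) = true := by
    simp [PySem.Str.strIsalpha, PySem.Chars.strIsalpha, halpha]
  have hl : pvIslowerStr [c] = false := by simp [pvIslowerStr, hlo]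
  have hu : pvIsupperStr [c] = true := by simp [pvIsupperStr, h, hlo]
  have hmodA : ∀ X : Int, PySem.Int.mod X 26 = X % 26 :=
    fun X => PySem.Int.mod_eq_emod_of_pos (by norm_num)
  have hfind : "ABCDEFGHIJKLMNOPQRSTUVWXYZ".toList.find?
        (fun t => [encrypt_char t s1 s2] == (String.ofList [c]).toList)
      = Option.map (fun i => Char.ofNat (65 + i))
          (if ((p:Int) + s1) % 26 < 13 then some ((((p:Int) + s1) % 26).toNat)
           else if 13 ≤ ((p:Int) - s2*s2) % 26 then some ((((p:Int) - s2*s2) % 26).toNat)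
           else none) := by
    rw [pvUpperList, List.find?_map]
    rw [pvFindCongr _ _ (fun i : Nat =>
        decide ((if (i:Int) < 13 then (i:Int) + (-s1) else (i:Int) - (-(s2^2))) % 26 = (p:Int)))]
    · rw [pvFindCore (-s1) (-(s2^2)) (p:Int) (by positivity) (by exact_mod_cast hp)]
      rw [show (p:Int) - -s1 = (p:Int) + s1 from by ring,
          show (p:Int) + -(s2^2) = (p:Int) - s2*s2 from by ring]
    · intro i hi
      have hi26 : i < 26 := List.mem_range.mp hi
      simp only [Function.comp, String.toList_ofList]
      rw [hc]
      simp only [encrypt_char, pvUpNotLower ⟨i, hi26⟩, pvUpIsupper ⟨i, hi26⟩,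
        Bool.false_eq_true, if_false, if_true]
      have hcast : ((Char.ofNat (65 + i)).toNat : Int) - 65 = (i : Int) := by
        rw [pvUpToNat ⟨i, hi26⟩]; push_cast; ring
      rw [hcast]
      by_cases h13 : (i : Int) < 13
      · simp only [if_pos h13, hmodA]
        rw [show (i:Int) + -s1 = (i:Int) - s1 from by ring]
        exact pvCharEqUp _ p (by omega) (by omega) hp
      · simp only [if_neg h13, hmodA]
        rw [show (i:Int) - -(s2^2) = (i:Int) + s2^2 from by ring]
        exact pvCharEqUp _ p (by omega) (by omega) hp
  simp only [decrypt_char, decrypt_char_alt, String.toList_ofList] at hfind ⊢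
  rw [hA] at *
  simp only [hl, hu, Bool.not_true, if_true, if_false, Bool.false_eq_true] at *
  rw [hfind]
  simp only [halpha, hlo, Bool.false_eq_true, if_true, if_false]
  have hpc : ((c.toNat : Nat) : Int) - 65 = (p : Int) := by omega
  rw [hpc]
  simp only [hmodA]
  split_ifs with hq1 hq2
  · have he : (65 + (((p:Int) + s1) % 26).toNat) = ((((p:Int) + s1) % 26) + 65).toNat := by
      omega
    simp only [Option.map_some, he]
  · have he : (65 + (((p:Int) - s2*s2) % 26).toNat) = ((((p:Int) - s2*s2) % 26) + 65).toNat := by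
      omega
    simp only [Option.map_some, he]
  · simp only [Option.map_none]

-- ===== VERDICT (by name: the statement is the Claim_ definition above) =====
theorem decrypt_char_spec : Claim_equal_decrypt_char := by
  intro char s1 s2 _
  unfold Spec_decrypt_char
  have hrep : String.ofList char.toList = char := by simp
  rcases hlist : char.toList with _ | ⟨c, _ | ⟨c2, rest⟩⟩
  · -- empty string: not alpha, both sides return char
    have hA : PySem.Str.strIsalpha char = false := by
      simp [PySem.Str.strIsalpha, PySem.Chars.strIsalpha, hlist]
    simp [decrypt_char, decrypt_char_alt, hlist, PySem.Str.strIsalpha, PySem.Chars.strIsalpha]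
  · -- single character
    rw [← hrep, hlist]
    by_cases hl : PySem.Chars.islower c = true
    · exact pvLowCase c s1 s2 hl
    · by_cases hu : PySem.Chars.isupper c = true
      · exact pvUpCase c s1 s2 hu
      · have halpha : PySem.Chars.isalpha c = false := by
          simp only [PySem.Chars.isalpha, Bool.or_eq_false_iff]
          exact ⟨by simpa using hu, by simpa using hl⟩
        have hAA : PySem.Chars.strIsalpha [c] = false := by
          simp [PySem.Chars.strIsalpha, halpha]
        simp [decrypt_char, decrypt_char_alt, PySem.Str.strIsalpha, hAA, halpha]
  · -- length ≥ 2: A's scans never match a 1-char candidate, both sides return char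
    simp [decrypt_char, decrypt_char_alt, hlist, ite_self]
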